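-- pv_equiv track=rewrite | github.com/bogipeneva/-Programming-101-Python-2019 | week01/week01.py | nan_expand
-- ===== SOURCE A (Python) =====
-- def join(items, delimiter):
--     result = ''
--     n = len(items)
--
--     for index in range(n):
--         item = items[index]
--
--         result = result + item
--
--         if index != n - 1:
--             result += delimiter
--
--     return result
--
-- def nan_expand(n):
--     string = ""
--     if n == 0:
--         return string
--     i = 0
--     list = []
--     while i < n:
--         list.append("Not a")
--         i = i+1
--     list.append("Nan")
--     string = join(list, ' ')
--     return string
-- ===== SOURCE B (Python) =====
-- def nan_expand(n):
--     if n == 0: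
--         return ""
--     return "Not a " * n + "Nan"
-- ===== Notes on version B (the rewrite author's own statement) =====
-- stated objective: simpler
-- what changed: The while-loop that builds a list and the hand-written index-based join with repeated string concatenation are replaced by a single closed-form string-repetition expression plus one concatenation.
import Mathlib
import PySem

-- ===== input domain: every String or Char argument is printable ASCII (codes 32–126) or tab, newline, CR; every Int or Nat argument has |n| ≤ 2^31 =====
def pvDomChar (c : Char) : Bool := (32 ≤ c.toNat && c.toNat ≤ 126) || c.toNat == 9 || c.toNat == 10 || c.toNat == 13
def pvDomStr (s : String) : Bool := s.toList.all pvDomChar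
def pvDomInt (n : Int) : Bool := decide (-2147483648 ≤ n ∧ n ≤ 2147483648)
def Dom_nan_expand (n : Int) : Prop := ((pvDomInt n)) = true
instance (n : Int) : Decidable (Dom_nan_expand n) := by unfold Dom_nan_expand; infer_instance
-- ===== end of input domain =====

-- B replaces the list-building loop and the hand-written join with the closed form "Not a " * n + "Nan" (simpler).

-- ===== PORT A =====
-- Python join: for index in range(n): result += items[index]; optional delimiter.
-- items[index] is always in range here (index < len(items)), so List.getD is exact.
def pvJoin (items : List String) (delimiter : String) : String :=
  (List.range items.length).foldl (fun result index =>
    let item := items.getD index ""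
    let result := result ++ item
    if index ≠ items.length - 1 then result ++ delimiter else result) ""

-- the while-loop: while i < n: list.append("Not a"); i = i+1
def pvNanLoop (n i : Int) (acc : List String) : List String :=
  if i < n then pvNanLoop n (i + 1) (acc ++ ["Not a"]) else acc
termination_by (n - i).toNat
decreasing_by omega

def nan_expand (n : Int) : String :=
  if n == 0 then ""
  else pvJoin (pvNanLoop n 0 [] ++ ["Nan"]) " "

-- ===== PORT B =====
-- Python "s * n" for a string: n copies of s, empty for n ≤ 0 (exact).
def pvStrMul (s : String) (n : Int) : String := String.join (List.replicate n.toNat s)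

def nan_expand_alt (n : Int) : String :=
  if n == 0 then ""
  else pvStrMul "Not a " n ++ "Nan"

-- ===== PRECONDITION & SPEC =====
def Spec_nan_expand (n : Int) (out : String) : Prop := out = nan_expand_alt n
instance (n : Int) (out : String) : Decidable (Spec_nan_expand n out) := by unfold Spec_nan_expand; infer_instance

-- ===== CLAIM (what is proved, stated in full; the proofs are below) =====
def Claim_equal_nan_expand : Prop := ∀ (n : Int), Dom_nan_expand n → Spec_nan_expand n (nan_expand n)

-- ===== LEMMAS AND PROOFS =====

theorem pvNanLoop_eq (n : Int) : ∀ (i : Int) (acc : List String),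
    pvNanLoop n i acc = acc ++ List.replicate (n - i).toNat "Not a" := by
  intro i acc
  fun_induction pvNanLoop n i acc with
  | case1 i acc h ih =>
      rw [ih]
      have hk : (n - i).toNat = (n - (i + 1)).toNat + 1 := by omega
      rw [hk, List.replicate_succ, List.append_assoc]
      rfl
  | case2 i acc h =>
      have hk : (n - i).toNat = 0 := by omega
      simp [hk]

theorem join_snoc (l : List String) (s : String) :
    String.join (l ++ [s]) = String.join l ++ s := by
  induction l with
  | nil => simp [String.join]
  | cons x xs ih => simp [String.join]

theorem pvJoin_replicate (k : Nat) :
    pvJoin (List.replicate k "Not a" ++ ["Nan"]) " "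
      = String.join (List.replicate k "Not a ") ++ "Nan" := by
  have hlen : (List.replicate k "Not a" ++ ["Nan"]).length = k + 1 := by simp
  have hgetL : ∀ m, m < k → (List.replicate k "Not a" ++ ["Nan"]).getD m "" = "Not a" := by
    intro m hm'
    have hlt : m < (List.replicate k "Not a").length := by simpa using hm'
    rw [List.getD, List.getElem?_append_left hlt]
    simp [hm']
  have hstep : ∀ m, m ≤ k →
      (List.range m).foldl (fun result index =>
        let item := (List.replicate k "Not a" ++ ["Nan"]).getD index ""
        let result := result ++ item
        if index ≠ k then result ++ " " else result) ""
      = String.join (List.replicate m "Not a ") := by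
    intro m hm
    induction m with
    | zero => simp [String.join]
    | succ m ih =>
        rw [List.range_succ, List.foldl_append, ih (by omega)]
        have hne : m ≠ k := by omega
        simp only [List.foldl_cons, List.foldl_nil, hgetL m (by omega), if_pos hne]
        rw [List.replicate_succ' (n := m), join_snoc, String.append_assoc]
        rfl
  have hgetR : (List.replicate k "Not a" ++ ["Nan"]).getD k "" = "Nan" := by
    simp [List.getD]
  unfold pvJoin
  rw [hlen]
  simp only [Nat.add_sub_cancel]
  rw [List.range_succ, List.foldl_append, hstep k le_rfl]
  simp

-- ===== VERDICT (by name: the statement is the Claim_ definition above) =====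
theorem nan_expand_spec : Claim_equal_nan_expand := by
  intro n _
  unfold Spec_nan_expand nan_expand nan_expand_alt
  by_cases h : n = 0
  · simp [h]
  · have hne : (n == 0) = false := by simp [h]
    rw [hne]
    simp only [Bool.false_eq_true, if_false]
    rw [pvNanLoop_eq, List.nil_append]
    have : (n - 0).toNat = n.toNat := by omega
    rw [this, pvJoin_replicate, pvStrMul]
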